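-- pv_equiv track=rewrite | github.com/ar90n/lab | contest/atcoder/abc129/E/main.py | solve
-- ===== SOURCE A (Python) =====
-- MOD = 1000000007  # type: int
--
-- def solve(L):
--     dp = [[0] * 2 for _ in range(len(L) + 1)]
--     dp[0][0] = 1
--
--     for i, c in enumerate(L):
--         # a=0, b=0
--         if c == '0':
--             dp[i+1][0] = dp[i][0]
--             dp[i+1][1] = dp[i][1]
--         else:
--             dp[i+1][1] = (dp[i][0] + dp[i][1])
--
--         # a=1, b=0
--         if c == '0':
--             dp[i+1][1] += dp[i][1]
--         else:
--             dp[i+1][0] += dp[i][0]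
--             dp[i+1][1] += dp[i][1]
--
--         # a=0, b=1
--         if c == '0':
--             dp[i+1][1] += dp[i][1]
--         else:
--             dp[i+1][0] += dp[i][0]
--             dp[i+1][1] += dp[i][1]
--
--         dp[i+1][0] %= MOD
--         dp[i+1][1] %= MOD
--
--     return sum(dp[-1]) % MOD
-- ===== SOURCE B (Python) =====
-- MOD = 1000000007  # type: int
--
-- def solve(L):
--     # One pass with two scalars: each set bit at index j contributes
--     # 2^(ones before j) * 3^(n-1-j); the all-tight term 2^(total ones) is added last.
--     n = len(L)
--     ans = 0
--     t = 1
--     for j, c in enumerate(L):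
--         if c != '0':
--             ans = (ans + t * pow(3, n - 1 - j, MOD)) % MOD
--             t = t * 2 % MOD
--     return (ans + t) % MOD
-- ===== Notes on version B (the rewrite author's own statement) =====
-- stated objective: alternative
-- what changed: Replaced the (n+1)x2 tight/free DP table with three unrolled (a,b)-case blocks per bit by a single pass keeping only two scalars: each set bit at index j adds 2^(ones before j) * 3^(n-1-j) (via modular pow) to the answer, plus a final 2^(total ones) all-tight term.
import Mathlib
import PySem

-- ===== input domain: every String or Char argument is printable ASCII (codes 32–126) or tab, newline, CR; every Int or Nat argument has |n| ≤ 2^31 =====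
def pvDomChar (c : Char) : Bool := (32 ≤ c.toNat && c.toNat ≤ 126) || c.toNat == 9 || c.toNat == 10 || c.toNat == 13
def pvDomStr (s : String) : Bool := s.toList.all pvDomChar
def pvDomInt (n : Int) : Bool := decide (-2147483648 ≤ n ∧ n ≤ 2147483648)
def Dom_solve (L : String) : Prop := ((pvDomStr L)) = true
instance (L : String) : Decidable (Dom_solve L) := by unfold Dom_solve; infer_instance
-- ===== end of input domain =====

-- B replaces A's row-by-row tight/free DP with three unrolled (a,b)-blocks per bit by a
-- one-pass accumulation of two scalars, weighting each set bit by a modular power of 3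
-- (objective: alternative; same cost).


-- ===== PORT A =====
-- A's dp table only ever reads row i to write row i+1, so the fold carries the current
-- row (dp[i][0], dp[i][1]); the three (a,b)-blocks are kept in A's order, and the final
-- mods mirror 'dp[i+1][0] %= MOD; dp[i+1][1] %= MOD'.
def solveStep (c : Char) (d : Int × Int) : Int × Int :=
  -- a=0, b=0
  let s1 : Int × Int := if c = '0' then (d.1, d.2) else (0, d.1 + d.2)
  -- a=1, b=0
  let s2 : Int × Int := if c = '0' then (s1.1, s1.2 + d.2) else (s1.1 + d.1, s1.2 + d.2)
  -- a=0, b=1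
  let s3 : Int × Int := if c = '0' then (s2.1, s2.2 + d.2) else (s2.1 + d.1, s2.2 + d.2)
  (PySem.Int.mod s3.1 1000000007, PySem.Int.mod s3.2 1000000007)

def solve (L : String) : Int :=
  let final := (PySem.List.enumerate L.toList 0).foldl (fun d ic => solveStep ic.2 d) (1, 0)
  PySem.Int.mod (final.1 + final.2) 1000000007

-- ===== PORT B =====
-- state = (ans, t); pow(3, n-1-j, MOD) is PySem.Int.powMod; the exponent n-1-j is
-- always ≥ 0 inside the loop, so .toNat is exact there.
def altStep (n : Int) (st : Int × Int) (jc : Int × Char) : Int × Int :=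
  if jc.2 ≠ '0' then
    (PySem.Int.mod (st.1 + st.2 * PySem.Int.powMod 3 (n - 1 - jc.1).toNat 1000000007) 1000000007,
     PySem.Int.mod (st.2 * 2) 1000000007)
  else st

def solve_alt (L : String) : Int :=
  let n : Int := PySem.Str.len L
  let st := (PySem.List.enumerate L.toList 0).foldl (altStep n) (0, 1)
  PySem.Int.mod (st.1 + st.2) 1000000007

-- ===== PRECONDITION & SPEC =====
def Spec_solve (L : String) (out : Int) : Prop := out = solve_alt L
instance (L : String) (out : Int) : Decidable (Spec_solve L out) := by unfold Spec_solve; infer_instance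

-- ===== CLAIM (what is proved, stated in full; the proofs are below) =====
def Claim_equal_solve : Prop := ∀ (L : String), Dom_solve L → Spec_solve L (solve L)

-- ===== LEMMAS AND PROOFS =====
lemma hMpos : (0:Int) < 1000000007 := by norm_num

lemma mulmod_left (a b : Int) : (a % 1000000007 * b) % 1000000007 = (a * b) % 1000000007 := by
  conv_rhs => rw [Int.mul_emod, ← Int.emod_emod_of_dvd a dvd_rfl, ← Int.mul_emod]

lemma addmul (x y : Int) (r : Nat) :
    ((x * 3 ^ (r + 1)) % 1000000007 + y * ((3:Int) ^ r % 1000000007)) % 1000000007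
      = (((y + (x + x + x)) % 1000000007) * 3 ^ r) % 1000000007 := by
  rw [mulmod_left]
  have h1 : (y * ((3:Int) ^ r % 1000000007)) % 1000000007 = (y * 3 ^ r) % 1000000007 := by
    rw [Int.mul_emod, Int.emod_emod_of_dvd _ dvd_rfl, ← Int.mul_emod]
  rw [Int.add_emod, h1, Int.emod_emod_of_dvd _ dvd_rfl, ← Int.add_emod]
  ring_nf

-- loop invariant: B's state tracks A's row — t equals dp[i][0], and ans carries
-- dp[i][1] pre-weighted by 3^(remaining length), everything mod 1000000007.
lemma inv_lemma (cs : List Char) (n : Int) : ∀ (s d0 d1 ans t : Int),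
    n - s = (cs.length : Int) →
    t = d0 → 0 ≤ d0 → d0 < 1000000007 →
    ans = (d1 * 3 ^ cs.length) % 1000000007 →
    ((PySem.List.enumerate cs s).foldl (altStep n) (ans, t)).2
      = (cs.foldl (fun d c => solveStep c d) (d0, d1)).1 ∧
    ((PySem.List.enumerate cs s).foldl (altStep n) (ans, t)).1
      = (cs.foldl (fun d c => solveStep c d) (d0, d1)).2 % 1000000007 := by
  induction cs with
  | nil =>
    intro s d0 d1 ans t hn ht h0 h1 hans
    simp [PySem.List.enumerate, ht, hans]
  | cons c rest ih =>
    intro s d0 d1 ans t hn ht h0 h1 hans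
    rw [PySem.List.enumerate_cons]
    simp only [List.foldl_cons]
    by_cases hc : c = '0'
    · have hstep : altStep n (ans, t) (s, c) = (ans, t) := by
        simp [altStep, hc]
      have hA : solveStep c (d0, d1) =
          (PySem.Int.mod d0 1000000007, PySem.Int.mod (d1 + d1 + d1) 1000000007) := by
        simp [solveStep, hc]
      rw [hstep, hA]
      have hd0 : PySem.Int.mod d0 1000000007 = d0 := by
        rw [PySem.Int.mod_eq_emod_of_pos hMpos]; exact Int.emod_eq_of_lt h0 h1
      rw [hd0]
      apply ih (s+1) d0 (PySem.Int.mod (d1+d1+d1) 1000000007) ans t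
      · simp at hn ⊢; omega
      · exact ht
      · exact h0
      · exact h1
      · rw [PySem.Int.mod_eq_emod_of_pos hMpos, hans]
        rw [mulmod_left]
        simp [List.length_cons, pow_succ]
        ring_nf
    · have hstep : altStep n (ans, t) (s, c) =
          (PySem.Int.mod (ans + t * PySem.Int.powMod 3 (n - 1 - s).toNat 1000000007) 1000000007,
           PySem.Int.mod (t * 2) 1000000007) := by
        simp [altStep, hc]
      have hA : solveStep c (d0, d1) =
          (PySem.Int.mod (d0 + d0) 1000000007,
           PySem.Int.mod (d0 + d1 + d1 + d1) 1000000007) := by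
        simp [solveStep, hc]
      rw [hstep, hA]
      have he : (n - 1 - s).toNat = rest.length := by simp at hn; omega
      have ht2 : PySem.Int.mod (t * 2) 1000000007 = PySem.Int.mod (d0 + d0) 1000000007 := by
        rw [ht]; ring_nf
      rw [ht2]
      apply ih (s+1) (PySem.Int.mod (d0+d0) 1000000007)
        (PySem.Int.mod (d0 + d1 + d1 + d1) 1000000007) _ _
      · simp at hn ⊢; omega
      · rfl
      · rw [PySem.Int.mod_eq_emod_of_pos hMpos]; exact Int.emod_nonneg _ (by norm_num)
      · rw [PySem.Int.mod_eq_emod_of_pos hMpos]; exact Int.emod_lt_of_pos _ hMpos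
      · rw [he, PySem.Int.powMod_eq, PySem.Int.mod_eq_emod_of_pos hMpos,
          PySem.Int.mod_eq_emod_of_pos hMpos, PySem.Int.mod_eq_emod_of_pos hMpos,
          hans, ht]
        simp only [List.length_cons]
        rw [addmul d1 d0 rest.length]
        ring_nf

-- A's fold ignores the enumerate index, so it is a fold over the characters.
lemma foldA_eq (cs : List Char) : ∀ (s : Int) (init : Int × Int),
    (PySem.List.enumerate cs s).foldl (fun d ic => solveStep ic.2 d) init
      = cs.foldl (fun d c => solveStep c d) init := by
  induction cs with
  | nil => intro s init; simp [PySem.List.enumerate]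
  | cons c rest ih =>
    intro s init
    rw [PySem.List.enumerate_cons]
    simp only [List.foldl_cons]
    exact ih (s+1) _

theorem solve_eq (L : String) : solve L = solve_alt L := by
  unfold solve solve_alt
  obtain ⟨h2, h1⟩ := inv_lemma L.toList (PySem.Str.len L) 0 1 0 0 1
    (by simp [PySem.Str.len_eq]) rfl (by norm_num) (by norm_num) (by simp)
  simp only [foldA_eq L.toList 0 (1, 0)]
  rw [h1, h2, PySem.Int.mod_eq_emod_of_pos hMpos, PySem.Int.mod_eq_emod_of_pos hMpos,
    Int.add_emod ((L.toList.foldl (fun d c => solveStep c d) (1, 0)).2 % 1000000007),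
    Int.emod_emod_of_dvd _ dvd_rfl, ← Int.add_emod, Int.add_comm]

-- ===== VERDICT (by name: the statement is the Claim_ definition above) =====
theorem solve_spec : Claim_equal_solve := by
  intro L _
  unfold Spec_solve
  exact solve_eq L
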